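-- pv_equiv track=rewrite | github.com/winvu88888888-maker/tinnam888888 | test_column_analysis.py | method_bigram
-- ===== SOURCE A (Python) =====
-- from collections import Counter, defaultdict
--
-- def method_transition(history, pos):
--     """Transition matrix: P(next_pos=x | last_pos=y)."""
--     trans = defaultdict(Counter)
--     for i in range(len(history) - 1):
--         trans[history[i][pos]][history[i+1][pos]] += 1
--     last_val = history[-1][pos]
--     if last_val in trans and trans[last_val]:
--         return trans[last_val].most_common(1)[0][0]
--     return last_val
--
-- def method_bigram(history, pos):
--     """2-draw history: P(next | last_2)."""
--     if len(history) < 3: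
--         return history[-1][pos]
--     trans = defaultdict(Counter)
--     for i in range(len(history) - 2):
--         key = (history[i][pos], history[i+1][pos])
--         trans[key][history[i+2][pos]] += 1
--     key = (history[-2][pos], history[-1][pos])
--     if key in trans and trans[key]:
--         return trans[key].most_common(1)[0][0]
--     return method_transition(history, pos)
-- ===== SOURCE B (Python) =====
-- def _bump(cnt, first, best, v):
--     """Online mode update: counts, first-seen rank, current argmax
--     (ties broken toward the earlier-seen value, = Counter.most_common order)."""
--     cnt[v] = cnt.get(v, 0) + 1
--     if v not in first:
--         first[v] = len(first)
--     if best is None or cnt[v] > cnt[best] or \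
--             (cnt[v] == cnt[best] and first[v] < first[best]):
--         best = v
--     return best
--
-- def method_bigram(history, pos):
--     """2-draw history: P(next | last_2), as ONE streaming pass.
--
--     No transition table is built: the loop carries the two previous values and
--     feeds two online-mode accumulators — one for successors of the target
--     bigram, one for successors of the last value (the transition fallback) —
--     so bigram answer and fallback come out of the same single pass."""
--     if len(history) < 3:
--         return history[-1][pos]
--     t1, t2 = history[-2][pos], history[-1][pos]
--     bcnt, bfirst, bbest = {}, {}, None
--     ucnt, ufirst, ubest = {}, {}, None
--     p2 = p1 = None
--     for row in history:
--         v = row[pos]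
--         if (p2, p1) == (t1, t2):
--             bbest = _bump(bcnt, bfirst, bbest, v)
--         if p1 == t2:
--             ubest = _bump(ucnt, ufirst, ubest, v)
--         p2, p1 = p1, v
--     if bbest is not None:
--         return bbest
--     if ubest is not None:
--         return ubest
--     return t2
-- ===== Notes on version B (the rewrite author's own statement) =====
-- stated objective: alternative
-- what changed: A builds a full defaultdict(Counter) bigram transition table and, on a miss, a second full unigram table, then sorts with Counter.most_common; B makes ONE streaming pass over history carrying the two previous values and feeding two online running-mode accumulators (count dict + first-seen rank + current argmax, tie-break to the earlier-seen value, which equals most_common's insertion-order rule) — one for successors of the target bigram and one for successors of the last value — so no transition table and no most_common/sorting step exist at all.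
import Mathlib
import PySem

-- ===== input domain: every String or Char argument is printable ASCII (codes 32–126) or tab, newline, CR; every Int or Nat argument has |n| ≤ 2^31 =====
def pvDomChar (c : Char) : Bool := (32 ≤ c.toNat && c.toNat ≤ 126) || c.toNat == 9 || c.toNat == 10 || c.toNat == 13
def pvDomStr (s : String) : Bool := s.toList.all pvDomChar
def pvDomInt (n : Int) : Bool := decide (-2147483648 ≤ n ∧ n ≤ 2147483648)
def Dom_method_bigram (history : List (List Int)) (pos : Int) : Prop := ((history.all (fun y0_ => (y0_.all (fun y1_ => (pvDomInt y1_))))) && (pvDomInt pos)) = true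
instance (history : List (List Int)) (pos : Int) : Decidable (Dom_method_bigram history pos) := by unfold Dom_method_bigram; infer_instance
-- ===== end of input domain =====

-- B replaces A's staged table builds (a defaultdict(Counter) bigram table, then on a miss a second
-- full transition table) by ONE streaming pass that carries the two previous values and maintains
-- two online running modes (counts + first-seen rank + current argmax); objective: alternative.

-- shared indexing helper: history[i][pos] (Python negative indices; defaults unreachable inside Pre_)
def pvAt (history : List (List Int)) (i pos : Int) : Int :=
  PySem.List.pyGetD (PySem.List.pyGetD history i []) pos 0

-- ===== PORT A =====
-- Counter.most_common(1)[0][0]: stable sort by count descending, first item's key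
def pvMostCommon1 (c : PySem.Dict Int Int) : Int :=
  ((PySem.List.sorted c.items (fun p => p.2) true).headD (0, 0)).1

def method_transition (history : List (List Int)) (pos : Int) : Int :=
  let trans := (PySem.List.pyRange 0 ((history.length : Int) - 1) 1).foldl
    (fun d i => d.modify (pvAt history i pos) PySem.Dict.empty
        (fun c => c.modify (pvAt history (i + 1) pos) 0 (· + 1))) PySem.Dict.empty
  let lastVal := pvAt history (-1) pos
  if trans.contains lastVal ∧ (trans.getD lastVal PySem.Dict.empty).size ≠ 0 then
    pvMostCommon1 (trans.getD lastVal PySem.Dict.empty)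
  else lastVal

def method_bigram (history : List (List Int)) (pos : Int) : Int :=
  if (history.length : Int) < 3 then pvAt history (-1) pos
  else
    let trans := (PySem.List.pyRange 0 ((history.length : Int) - 2) 1).foldl
      (fun d i => d.modify (pvAt history i pos, pvAt history (i + 1) pos) PySem.Dict.empty
          (fun c => c.modify (pvAt history (i + 2) pos) 0 (· + 1))) PySem.Dict.empty
    let key := (pvAt history (-2) pos, pvAt history (-1) pos)
    if trans.contains key ∧ (trans.getD key PySem.Dict.empty).size ≠ 0 then
      pvMostCommon1 (trans.getD key PySem.Dict.empty)
    else method_transition history pos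

-- ===== PORT B =====
-- _bump: online mode update on (counts, first-seen rank, current best)
def pvBump (s : PySem.Dict Int Int × PySem.Dict Int Int × Option Int) (v : Int) :
    PySem.Dict Int Int × PySem.Dict Int Int × Option Int :=
  let cnt := s.1.insert v (s.1.getD v 0 + 1)
  let first := if s.2.1.contains v then s.2.1 else s.2.1.insert v (s.2.1.size : Int)
  let best := match s.2.2 with
    | none => some v
    | some b =>
        if cnt.getD v 0 > cnt.getD b 0 ∨
            (cnt.getD v 0 = cnt.getD b 0 ∧ first.getD v 0 < first.getD b 0) then some v
        else some b
  (cnt, first, best)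

def method_bigram_alt (history : List (List Int)) (pos : Int) : Int :=
  if (history.length : Int) < 3 then pvAt history (-1) pos
  else
    let t1 := pvAt history (-2) pos
    let t2 := pvAt history (-1) pos
    let s := history.foldl (fun s row =>
        let v := PySem.List.pyGetD row pos 0
        ((if (s.2.2.1, s.2.2.2) = (some t1, some t2) then pvBump s.1 v else s.1),
         (if s.2.2.2 = some t2 then pvBump s.2.1 v else s.2.1),
         s.2.2.2, some v))
      ((PySem.Dict.empty, PySem.Dict.empty, none),
       (PySem.Dict.empty, PySem.Dict.empty, none), none, none)
    match s.1.2.2 with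
    | some m => m
    | none =>
      match s.2.1.2.2 with
      | some m => m
      | none => t2

-- ===== PRECONDITION & SPEC =====
-- Pre_ = exactly the inputs on which Python A returns (no IndexError): history nonempty, and the
-- rows A actually indexes at pos are in range (only the last row when len(history) < 3, else all rows).
def Pre_method_bigram (history : List (List Int)) (pos : Int) : Prop :=
  history ≠ [] ∧
    (if history.length < 3 then PySem.Raise.InRange (history.getLastD []).length pos
     else ∀ row ∈ history, PySem.Raise.InRange row.length pos)
instance (history : List (List Int)) (pos : Int) : Decidable (Pre_method_bigram history pos) := by
  unfold Pre_method_bigram; infer_instance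
def pvWitness_method_bigram : List (List Int) × Int := ([[1], [2], [1], [3]], 0)

def Spec_method_bigram (history : List (List Int)) (pos : Int) (out : Int) : Prop := out = method_bigram_alt history pos
instance (history : List (List Int)) (pos : Int) (out : Int) : Decidable (Spec_method_bigram history pos out) := by unfold Spec_method_bigram; infer_instance

-- ===== CLAIM (what is proved, stated in full; the proofs are below) =====
def Claim_equal_method_bigram : Prop := ∀ (history : List (List Int)) (pos : Int), Dom_method_bigram history pos → Pre_method_bigram history pos → Spec_method_bigram history pos (method_bigram history pos)

-- ===== LEMMAS AND PROOFS =====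

-- ---------- A-side: table build + most_common reduced to filtered successors + first-mode ----------

theorem pv_getD_fold {κ : Type} [BEq κ] [LawfulBEq κ] [DecidableEq κ]
    (k : Int → κ) (v : Int → Int) (K : κ) :
    ∀ (is : List Int) (d : PySem.Dict κ (PySem.Dict Int Int)),
    (is.foldl (fun d i => d.modify (k i) PySem.Dict.empty
        (fun c => c.modify (v i) 0 (· + 1))) d).getD K PySem.Dict.empty
      = ((is.filter (fun i => k i == K)).map v).foldl
          (fun c x => c.modify x 0 (· + 1)) (d.getD K PySem.Dict.empty) := by
  intro is
  induction is with
  | nil => intro d; rfl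
  | cons i is ih =>
    intro d
    simp only [List.foldl_cons, List.filter_cons]
    rw [ih, PySem.Dict.getD_modify]
    by_cases h : k i = K
    · subst h; simp
    · rw [if_neg (Ne.symm h), show (k i == K) = false by simpa using h]
      simp

theorem pv_contains_fold {κ : Type} [BEq κ] [LawfulBEq κ]
    (k : Int → κ) (v : Int → Int) (K : κ) :
    ∀ (is : List Int) (d : PySem.Dict κ (PySem.Dict Int Int)),
    (is.foldl (fun d i => d.modify (k i) PySem.Dict.empty
        (fun c => c.modify (v i) 0 (· + 1))) d).contains K
      = (d.contains K || is.any (fun i => k i == K)) := by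
  intro is
  induction is with
  | nil => intro d; simp
  | cons i is ih =>
    intro d
    simp only [List.foldl_cons, List.any_cons]
    rw [ih, PySem.Dict.contains_modify]
    by_cases h : k i = K
    · simp [h]
    · rw [show (k i == K) = false by simpa using h,
          show (K == k i) = false by simpa using Ne.symm h]
      simp

theorem pv_head?_insertBy {α κ : Type} [LinearOrder κ] (key : α → κ) (x : α) (acc : List α) :
    (PySem.List.insertBy (fun a b => decide (key b < key a)) x acc).head? =
      some (match acc.head? with
            | none => x
            | some m => if key m < key x then x else m) := by
  cases acc with
  | nil => rfl
  | cons y ys =>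
    simp only [PySem.List.insertBy, List.head?_cons]
    by_cases h : key y < key x <;> simp [h]

theorem pv_head?_foldl {α κ : Type} [LinearOrder κ] (key : α → κ) :
    ∀ (xs acc : List α),
    (xs.foldl (fun acc x => PySem.List.insertBy (fun a b => decide (key b < key a)) x acc) acc).head?
      = xs.foldl (fun o x => match o with
          | none => some x
          | some m => if key m < key x then some x else some m) acc.head? := by
  intro xs
  induction xs with
  | nil => intro acc; rfl
  | cons x xs ih =>
    intro acc
    simp only [List.foldl_cons]
    rw [ih, pv_head?_insertBy]
    congr 1
    cases h : acc.head? with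
    | none => rfl
    | some m => by_cases hk : key m < key x <;> simp [hk]

theorem pv_head?_sorted_rev {α κ : Type} [LinearOrder κ] (xs : List α) (key : α → κ) :
    (PySem.List.sorted xs key true).head? = PySem.List.max? xs key := by
  rw [PySem.List.sorted_rev_eq_foldl_insertBy, pv_head?_foldl]
  rfl

theorem pv_max?_map_aux {α β κ : Type} [LT κ] [DecidableLT κ] (f : α → β) (key : β → κ) :
    ∀ (xs : List α) (o : Option α),
    ((xs.map f).foldl (fun acc x => match acc with
        | none => some x
        | some m => if key m < key x then some x else some m) (o.map f))
      = (xs.foldl (fun acc a => match acc with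
        | none => some a
        | some m => if key (f m) < key (f a) then some a else some m) o).map f := by
  intro xs
  induction xs with
  | nil => intro o; rfl
  | cons a xs ih =>
    intro o
    simp only [List.map_cons, List.foldl_cons]
    cases o with
    | none => exact ih (some a)
    | some m =>
      by_cases h : key (f m) < key (f a) <;> simp only [Option.map_some, h, if_true, if_false] <;>
        [exact ih (some a); exact ih (some m)]

theorem pv_max?_map {α β κ : Type} [LT κ] [DecidableLT κ] (xs : List α) (f : α → β) (key : β → κ) :
    PySem.List.max? (xs.map f) key = (PySem.List.max? xs (fun a => key (f a))).map f := by
  simpa using pv_max?_map_aux f key xs none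

theorem pv_mostCommon_eq (N : List Int) (h : N ≠ []) :
    pvMostCommon1 (PySem.Dict.counter N)
      = (PySem.List.max? (PySem.List.dedup N) (fun x => (N.count x : Int))).getD 0 := by
  have hS : PySem.Set.ofList N ≠ [] := by
    obtain ⟨x, hx⟩ := List.exists_mem_of_ne_nil N h
    exact List.ne_nil_of_mem ((PySem.Set.mem_ofList N x).mpr hx)
  obtain ⟨m, hm⟩ : ∃ m, PySem.List.max? (PySem.Set.ofList N)
      (fun x => ((N.count x : Int))) = some m := by
    cases hmm : PySem.List.max? (PySem.Set.ofList N) (fun x => ((N.count x : Int))) with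
    | none => exact absurd ((PySem.List.max?_eq_none_iff _ _).mp hmm) hS
    | some m => exact ⟨m, rfl⟩
  unfold pvMostCommon1
  rw [List.headD_eq_head?_getD, pv_head?_sorted_rev, PySem.Dict.items_counter, pv_max?_map,
      PySem.List.dedup_eq_ofList,
      show (fun a : Int => ((a, (N.count a : Int)) : Int × Int).2)
        = fun x : Int => (N.count x : Int) from rfl,
      hm]
  rfl

theorem pv_core {κ : Type} [BEq κ] [LawfulBEq κ] [DecidableEq κ]
    (k : Int → κ) (v : Int → Int) (K : κ) (is : List Int) (fb : Int) :
    (if (is.foldl (fun d i => d.modify (k i) PySem.Dict.empty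
          (fun c => c.modify (v i) 0 (· + 1)))
          (PySem.Dict.empty : PySem.Dict κ (PySem.Dict Int Int))).contains K ∧
        ((is.foldl (fun d i => d.modify (k i) PySem.Dict.empty
          (fun c => c.modify (v i) 0 (· + 1)))
          (PySem.Dict.empty : PySem.Dict κ (PySem.Dict Int Int))).getD K PySem.Dict.empty).size ≠ 0 then
       pvMostCommon1 ((is.foldl (fun d i => d.modify (k i) PySem.Dict.empty
          (fun c => c.modify (v i) 0 (· + 1)))
          (PySem.Dict.empty : PySem.Dict κ (PySem.Dict Int Int))).getD K PySem.Dict.empty)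
     else fb)
    = (if ((is.filter (fun i => k i == K)).map v) ≠ [] then
         (PySem.List.max? (PySem.List.dedup ((is.filter (fun i => k i == K)).map v))
           (fun x => (((is.filter (fun i => k i == K)).map v).count x : Int))).getD 0
       else fb) := by
  have key1 := pv_getD_fold k v K is PySem.Dict.empty
  have key2 := pv_contains_fold k v K is PySem.Dict.empty
  rw [PySem.Dict.getD_empty] at key1
  rw [PySem.Dict.contains_empty, Bool.false_or] at key2
  rw [key2, key1, ← PySem.Dict.counter_eq_foldl]
  by_cases hne : (is.filter (fun i => k i == K)).map v = []
  · rw [if_neg, if_neg (by simpa using hne)]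
    intro hand
    have : ∃ i ∈ is, (k i == K) = true := by simpa [List.any_eq_true] using hand.1
    obtain ⟨i, hi, hki⟩ := this
    rw [List.map_eq_nil_iff, List.filter_eq_nil_iff] at hne
    exact hne i hi hki
  · have hany : is.any (fun i => k i == K) = true := by
      rw [List.map_eq_nil_iff] at hne
      obtain ⟨i, hi⟩ := List.exists_mem_of_ne_nil _ hne
      have := List.of_mem_filter hi
      exact List.any_eq_true.mpr ⟨i, List.mem_of_mem_filter hi, this⟩
    have hsz : (PySem.Dict.counter ((is.filter (fun i => k i == K)).map v)).size ≠ 0 := by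
      have hit : (PySem.Dict.counter ((is.filter (fun i => k i == K)).map v)).items ≠ [] := by
        rw [PySem.Dict.items_counter]
        simp only [ne_eq, List.map_eq_nil_iff]
        obtain ⟨x, hx⟩ := List.exists_mem_of_ne_nil _ hne
        exact List.ne_nil_of_mem ((PySem.Set.mem_ofList _ x).mpr hx)
      simpa [PySem.Dict.size, List.length_eq_zero_iff] using hit
    rw [if_pos ⟨by rw [hany], hsz⟩, if_pos hne]
    exact pv_mostCommon_eq _ hne

-- ---------- PySem.List.max? : snoc step and first-extremal characterization ----------

theorem pv_max?_snoc {α : Type} (key : α → Int) (xs : List α) (v : α) :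
    PySem.List.max? (xs ++ [v]) key
      = match PySem.List.max? xs key with
        | none => some v
        | some m => if key m < key v then some v else some m := by
  unfold PySem.List.max?
  rw [List.foldl_append]
  rfl

def pvChar {α : Type} (key : α → Int) (xs : List α) (m : α) (i : Nat) : Prop :=
  ∃ h : i < xs.length, xs[i] = m ∧
    (∀ j (hj : j < xs.length), j < i → key xs[j] < key m) ∧
    (∀ j (hj : j < xs.length), key xs[j] ≤ key m)

theorem pv_max?_char {α : Type} (key : α → Int) (xs : List α) (m : α)
    (h : PySem.List.max? xs key = some m) : ∃ i, pvChar key xs m i := by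
  induction xs using List.reverseRecOn generalizing m with
  | nil => simp [PySem.List.max?] at h
  | append_singleton xs v ih =>
    rw [pv_max?_snoc] at h
    cases hmx : PySem.List.max? xs key with
    | none =>
      have hnil : xs = [] := (PySem.List.max?_eq_none_iff _ _).mp hmx
      subst hnil
      rw [hmx] at h
      simp only at h
      injection h with hmv
      subst m
      refine ⟨0, by simp, rfl, by omega, ?_⟩
      intro j hj
      have hj0 : j = 0 := by simp at hj; omega
      subst hj0
      simp
    | some b =>
      rw [hmx] at h
      simp only at h
      by_cases hlt : key b < key v
      · rw [if_pos hlt] at h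
        injection h with hmv
        subst m
        refine ⟨xs.length, by simp, by simp, ?_, ?_⟩
        · intro j hj hji
          have hjx : j < xs.length := by omega
          rw [List.getElem_append_left hjx]
          exact lt_of_le_of_lt (PySem.List.max?_isMax hmx _ (by simp)) hlt
        · intro j hj
          rcases Nat.lt_or_ge j xs.length with hjx | hjx
          · rw [List.getElem_append_left hjx]
            exact le_of_lt (lt_of_le_of_lt (PySem.List.max?_isMax hmx _ (by simp)) hlt)
          · have : j = xs.length := by simp at hj; omega
            subst this
            simp
      · rw [if_neg hlt] at h
        injection h with hmv
        subst m
        obtain ⟨i, hi, hxi, hpre, hall⟩ := ih b hmx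
        refine ⟨i, by simp; omega, by rw [List.getElem_append_left hi]; exact hxi, ?_, ?_⟩
        · intro j hj hji
          have hjx : j < xs.length := by omega
          rw [List.getElem_append_left hjx]
          exact hpre j hjx hji
        · intro j hj
          rcases Nat.lt_or_ge j xs.length with hjx | hjx
          · rw [List.getElem_append_left hjx]
            exact hall j hjx
          · have : j = xs.length := by simp at hj; omega
            subst this
            simpa using le_of_not_gt hlt

theorem pv_char_unique {α : Type} (key : α → Int) (xs : List α) (m1 m2 : α) (i1 i2 : Nat)
    (h1 : pvChar key xs m1 i1) (h2 : pvChar key xs m2 i2) : m1 = m2 := by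
  obtain ⟨hl1, he1, hp1, ha1⟩ := h1
  obtain ⟨hl2, he2, hp2, ha2⟩ := h2
  rcases Nat.lt_trichotomy i1 i2 with h | h | h
  · have s1 : key xs[i1] < key m2 := hp2 i1 hl1 h
    have s2 : key xs[i2] ≤ key m1 := ha1 i2 hl2
    rw [he1] at s1; rw [he2] at s2; omega
  · subst h; rw [← he1, ← he2]
  · have s1 : key xs[i2] < key m1 := hp1 i2 hl2 h
    have s2 : key xs[i1] ≤ key m2 := ha2 i1 hl1
    rw [he2] at s1; rw [he1] at s2; omega

theorem pv_max?_of_char {α : Type} (key : α → Int) (xs : List α) (m : α) (i : Nat)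
    (h : pvChar key xs m i) : PySem.List.max? xs key = some m := by
  have hl := h.1
  have hne : xs ≠ [] := by intro hx; subst hx; simp at hl
  cases hmx : PySem.List.max? xs key with
  | none => exact absurd ((PySem.List.max?_eq_none_iff _ _).mp hmx) hne
  | some m' =>
    obtain ⟨i', hc'⟩ := pv_max?_char key xs m' hmx
    rw [pv_char_unique key xs m' m i' i hc' h]

-- ---------- counts, dedup and the first-seen-rank dict ----------

theorem pv_count_snoc (N : List Int) (v x : Int) :
    (N ++ [v]).count x = N.count x + (if x = v then 1 else 0) := by
  by_cases h : x = v <;> simp [List.count_append, List.count_cons, h]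
  · intro he; exact h he.symm

theorem pv_dedup_nil_iff (N : List Int) : PySem.List.dedup N = [] ↔ N = [] := by
  constructor
  · intro h
    cases N with
    | nil => rfl
    | cons a l =>
      exfalso
      have h2 : a ∈ PySem.List.dedup (a :: l) := by
        rw [PySem.List.dedup_eq_ofList]
        exact (PySem.Set.mem_ofList _ a).mpr (by simp)
      rw [h] at h2
      simp at h2
  · intro h; subst h; rfl

theorem pv_dedup_snoc (N : List Int) (v : Int) :
    PySem.List.dedup (N ++ [v])
      = if v ∈ N then PySem.List.dedup N else PySem.List.dedup N ++ [v] := by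
  rw [PySem.List.dedup_eq_ofList, PySem.List.dedup_eq_ofList]
  show (N ++ [v]).foldl PySem.Set.add PySem.Set.empty = _
  rw [List.foldl_append]
  show PySem.Set.add (PySem.Set.ofList N) v = _
  unfold PySem.Set.add
  by_cases h : v ∈ N
  · rw [if_pos, if_pos h]
    have := (PySem.Set.mem_ofList N v).mpr h
    simpa [List.contains_iff_mem] using this
  · rw [if_neg, if_neg h]
    intro hc
    exact h ((PySem.Set.mem_ofList N v).mp (by simpa [List.contains_iff_mem] using hc))

def pvFM (N : List Int) : PySem.Dict Int Int :=
  N.foldl (fun f v => if f.contains v then f else f.insert v (f.size : Int)) PySem.Dict.empty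


theorem pv_FM_spec (N : List Int) :
    (pvFM N).size = (PySem.List.dedup N).length ∧
    (∀ x, (pvFM N).contains x = decide (x ∈ N)) ∧
    (∀ x ∈ N, (pvFM N).getD x 0 = ((PySem.List.dedup N).idxOf x : Int)) := by
  induction N using List.reverseRecOn with
  | nil => refine ⟨rfl, fun x => rfl, fun x hx => absurd hx (by simp)⟩
  | append_singleton N v ih =>
    obtain ⟨ihs, ihc, ihg⟩ := ih
    have hstep : pvFM (N ++ [v])
        = if (pvFM N).contains v then pvFM N else (pvFM N).insert v ((pvFM N).size : Int) := by
      unfold pvFM; rw [List.foldl_append]; rfl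
    by_cases hv : v ∈ N
    · rw [hstep, ihc v, if_pos (by simpa using hv), pv_dedup_snoc, if_pos hv]
      refine ⟨ihs, fun x => ?_, fun x hx => ?_⟩
      · rw [ihc x]
        by_cases hx : x = v <;> simp [hx, hv]
      · have hx' : x ∈ N := by
          rcases List.mem_append.mp hx with h | h
          · exact h
          · simpa using (by simpa using h) ▸ hv
        exact ihg x hx'
    · rw [hstep, ihc v, if_neg (by simpa using hv), pv_dedup_snoc, if_neg hv]
      have hvD : v ∉ PySem.List.dedup N := by
        rw [PySem.List.mem_dedup]; exact hv
      refine ⟨?_, fun x => ?_, fun x hx => ?_⟩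
      · rw [PySem.Dict.size_insert, ihc v, if_neg (by simpa using hv), ihs]
        simp
      · rw [PySem.Dict.contains_insert, ihc x]
        by_cases hx : x = v <;> simp [hx, hv]
      · rw [PySem.Dict.getD_insert]
        by_cases hx' : x = v
        · subst hx'
          rw [if_pos rfl, List.idxOf_append, if_neg hvD, ihs]
          simp [List.idxOf_cons_self]
        · have hx'' : x ∈ N := by
            rcases List.mem_append.mp hx with h | h
            · exact h
            · exact absurd (by simpa using h) hx'
          rw [if_neg hx', List.idxOf_append,
              if_pos ((PySem.List.mem_dedup _ _).mpr hx''), ihg x hx'']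

-- ---------- the streaming best step ----------

theorem pv_best_step (N : List Int) (v : Int) :
    (match PySem.List.max? (PySem.List.dedup N) (fun x => (N.count x : Int)) with
     | none => some v
     | some b =>
       if (((N ++ [v]).count v : Int) > ((N ++ [v]).count b : Int)) ∨
          ((((N ++ [v]).count v : Int) = ((N ++ [v]).count b : Int)) ∧
            (((PySem.List.dedup (N ++ [v])).idxOf v : Int) < ((PySem.List.dedup (N ++ [v])).idxOf b : Int)))
       then some v else some b)
    = PySem.List.max? (PySem.List.dedup (N ++ [v])) (fun x => ((N ++ [v]).count x : Int)) := by
  have hcnt : ∀ x : Int, (((N ++ [v]).count x : Int)) = (N.count x : Int) + (if x = v then 1 else 0) := by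
    intro x; rw [pv_count_snoc]; push_cast; split <;> simp
  have hcv : (((N ++ [v]).count v : Int)) = (N.count v : Int) + 1 := by
    rw [hcnt, if_pos rfl]
  have hcne : ∀ x : Int, x ≠ v → (((N ++ [v]).count x : Int)) = (N.count x : Int) := by
    intro x hx; rw [hcnt, if_neg hx]; ring
  cases hb : PySem.List.max? (PySem.List.dedup N) (fun x => (N.count x : Int)) with
  | none =>
    have hN : N = [] := (pv_dedup_nil_iff N).mp ((PySem.List.max?_eq_none_iff _ _).mp hb)
    subst hN
    simp only []
    show some v = PySem.List.max? (PySem.List.dedup [v]) _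
    rfl
  | some b =>
    simp only []
    have hDnd : (PySem.List.dedup N).Nodup := PySem.List.nodup_dedup N
    have hbD : b ∈ PySem.List.dedup N := PySem.List.max?_mem hb
    have hbN : b ∈ N := (PySem.List.mem_dedup _ _).mp hbD
    obtain ⟨ib, hib, heb, hpre0, hall0⟩ := pv_max?_char _ _ _ hb
    have hpre : ∀ j (hj : j < (PySem.List.dedup N).length), j < ib →
        ((N.count ((PySem.List.dedup N)[j]) : Int)) < (N.count b : Int) := by
      intro j hj hji; simpa using hpre0 j hj hji
    have hall : ∀ j (hj : j < (PySem.List.dedup N).length),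
        ((N.count ((PySem.List.dedup N)[j]) : Int)) ≤ (N.count b : Int) := by
      intro j hj; simpa using hall0 j hj
    have hib' : (PySem.List.dedup N).idxOf b = ib := by
      have h1 : (PySem.List.dedup N).idxOf b < (PySem.List.dedup N).length :=
        List.idxOf_lt_length_of_mem hbD
      exact (List.Nodup.getElem_inj_iff hDnd).mp (by rw [List.getElem_idxOf h1, heb])
    have hfb1 : 1 ≤ N.count b := List.one_le_count_iff.mpr hbN
    by_cases hvN : v ∈ N
    · have hD' : PySem.List.dedup (N ++ [v]) = PySem.List.dedup N := by
        rw [pv_dedup_snoc, if_pos hvN]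
      have hvD : v ∈ PySem.List.dedup N := (PySem.List.mem_dedup _ _).mpr hvN
      have hivlt : (PySem.List.dedup N).idxOf v < (PySem.List.dedup N).length :=
        List.idxOf_lt_length_of_mem hvD
      have hev : (PySem.List.dedup N)[(PySem.List.dedup N).idxOf v] = v := List.getElem_idxOf hivlt
      rw [hD']
      by_cases hvb : v = b
      · subst hvb
        rw [if_neg (by rw [hcv]; simp)]
        refine (pv_max?_of_char _ _ _ ib ⟨hib, heb, ?_, ?_⟩).symm
        · intro j hj hji
          have hne : (PySem.List.dedup N)[j] ≠ v := by
            intro he; rw [← heb] at he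
            exact absurd ((List.Nodup.getElem_inj_iff hDnd).mp he) (by omega)
          have hcj := hpre j hj hji
          rw [hcne _ hne, hcv]
          omega
        · intro j hj
          by_cases he : (PySem.List.dedup N)[j] = v
          · rw [he]
          · have hcj := hall j hj
            rw [hcne _ he, hcv]
            omega
      · have hfb : (((N ++ [v]).count b : Int)) = (N.count b : Int) := hcne b (Ne.symm hvb)
        by_cases h1 : (N.count b : Int) < (N.count v : Int) + 1
        · -- v strictly wins
          rw [if_pos (Or.inl (by rw [hcv, hfb]; omega))]
          refine (pv_max?_of_char _ _ _ ((PySem.List.dedup N).idxOf v)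
            ⟨hivlt, hev, ?_, ?_⟩).symm
          · intro j hj hji
            have hne : (PySem.List.dedup N)[j] ≠ v := by
              intro he; rw [← hev] at he
              exact absurd ((List.Nodup.getElem_inj_iff hDnd).mp he) (by omega)
            have hcj := hall j hj
            rw [hcne _ hne, hcv]
            omega
          · intro j hj
            by_cases he : (PySem.List.dedup N)[j] = v
            · rw [he]
            · have hcj := hall j hj
              rw [hcne _ he, hcv]
              omega
        · by_cases h2 : (N.count b : Int) = (N.count v : Int) + 1
          · -- tie on the new counts: first-seen order decides
            by_cases h3 : (PySem.List.dedup N).idxOf v < (PySem.List.dedup N).idxOf b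
            · have h3' : (PySem.List.dedup N).idxOf v < ib := hib' ▸ h3
              rw [if_pos (Or.inr ⟨by rw [hcv, hfb]; omega, by exact_mod_cast h3⟩)]
              refine (pv_max?_of_char _ _ _ ((PySem.List.dedup N).idxOf v)
                ⟨hivlt, hev, ?_, ?_⟩).symm
              · intro j hj hji
                have hne : (PySem.List.dedup N)[j] ≠ v := by
                  intro he; rw [← hev] at he
                  exact absurd ((List.Nodup.getElem_inj_iff hDnd).mp he) (by omega)
                have hcj := hpre j hj (by omega)
                rw [hcne _ hne, hcv]
                omega
              · intro j hj
                by_cases he : (PySem.List.dedup N)[j] = v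
                · rw [he]
                · have hcj := hall j hj
                  rw [hcne _ he, hcv]
                  omega
            · rw [if_neg ?_]
              · refine (pv_max?_of_char _ _ _ ib ⟨hib, heb, ?_, ?_⟩).symm
                · intro j hj hji
                  have hne : (PySem.List.dedup N)[j] ≠ v := by
                    intro he; rw [← hev] at he
                    have h4 := (List.Nodup.getElem_inj_iff hDnd).mp he
                    rw [← hib'] at hji
                    omega
                  have hcj := hpre j hj hji
                  rw [hcne _ hne, hfb]
                  omega
                · intro j hj
                  by_cases he : (PySem.List.dedup N)[j] = v
                  · rw [he, hcv, hfb]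
                    omega
                  · have hcj := hall j hj
                    rw [hcne _ he, hfb]
                    omega
              · rw [hcv, hfb]
                push Not
                refine ⟨by omega, fun _ => ?_⟩
                exact_mod_cast Nat.not_lt.mp h3
          · -- b still strictly ahead
            rw [if_neg (by rw [hcv, hfb]; push Not; exact ⟨by omega, fun h => absurd h (by omega)⟩)]
            refine (pv_max?_of_char _ _ _ ib ⟨hib, heb, ?_, ?_⟩).symm
            · intro j hj hji
              by_cases he : (PySem.List.dedup N)[j] = v
              · rw [he, hcv, hfb]
                omega
              · have hcj := hpre j hj hji
                rw [hcne _ he, hfb]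
                omega
            · intro j hj
              by_cases he : (PySem.List.dedup N)[j] = v
              · rw [he, hcv, hfb]
                omega
              · have hcj := hall j hj
                rw [hcne _ he, hfb]
                omega
    · -- v is fresh: it is appended at the end with count 1, b stays the first maximum
      have hvD : v ∉ PySem.List.dedup N := fun h => hvN ((PySem.List.mem_dedup _ _).mp h)
      have hD' : PySem.List.dedup (N ++ [v]) = PySem.List.dedup N ++ [v] := by
        rw [pv_dedup_snoc, if_neg hvN]
      have hvb : v ≠ b := fun h => hvN (h ▸ hbN)
      have hcv0 : N.count v = 0 := List.count_eq_zero.mpr hvN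
      have hfb : (((N ++ [v]).count b : Int)) = (N.count b : Int) := hcne b (Ne.symm hvb)
      have hfv : (((N ++ [v]).count v : Int)) = 1 := by rw [hcv, hcv0]; ring
      have hidxv : (PySem.List.dedup N ++ [v]).idxOf v = (PySem.List.dedup N).length := by
        rw [List.idxOf_append, if_neg hvD]
        simp
      have hidxb : (PySem.List.dedup N ++ [v]).idxOf b = ib := by
        rw [List.idxOf_append, if_pos hbD, hib']
      rw [hD', if_neg ?_]
      · refine (pv_max?_of_char _ _ _ ib
          ⟨by simp only [List.length_append, List.length_cons, List.length_nil]; omega,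
           by rw [List.getElem_append_left hib]; exact heb, ?_, ?_⟩).symm
        · intro j hj hji
          have hjx : j < (PySem.List.dedup N).length := by omega
          rw [List.getElem_append_left hjx]
          have hne : (PySem.List.dedup N)[j] ≠ v := fun he => hvD (he ▸ List.getElem_mem hjx)
          have hcj := hpre j hjx hji
          rw [hcne _ hne, hfb]
          omega
        · intro j hj
          rcases Nat.lt_or_ge j (PySem.List.dedup N).length with hjx | hjx
          · rw [List.getElem_append_left hjx]
            have hne : (PySem.List.dedup N)[j] ≠ v := fun he => hvD (he ▸ List.getElem_mem hjx)
            have hcj := hall j hjx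
            rw [hcne _ hne, hfb]
            omega
          · have hj' : j = (PySem.List.dedup N).length := by
              simp only [List.length_append, List.length_cons, List.length_nil] at hj; omega
            subst hj'
            rw [List.getElem_append_right (Nat.le_refl _)]
            simp only [Nat.sub_self, List.getElem_cons_zero]
            rw [hfv, hfb]
            omega
      · rw [hfv, hfb, hidxv, hidxb]
        push Not
        refine ⟨by omega, fun _ => ?_⟩
        exact_mod_cast (le_of_lt hib)

-- ---------- the streaming fold computes (counter, first-rank, running mode) ----------

theorem pv_stream_inv (N : List Int) :
    N.foldl pvBump (PySem.Dict.empty, PySem.Dict.empty, none)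
      = (PySem.Dict.counter N, pvFM N,
         PySem.List.max? (PySem.List.dedup N) (fun x => (N.count x : Int))) := by
  induction N using List.reverseRecOn with
  | nil => rfl
  | append_singleton N v ih =>
    rw [List.foldl_append, ih]
    have hcnt : (PySem.Dict.counter N).insert v ((PySem.Dict.counter N).getD v 0 + 1)
        = PySem.Dict.counter (N ++ [v]) := by
      rw [← PySem.Dict.foldl_insert_getD_add_one_eq_counter (N ++ [v]), List.foldl_append,
          PySem.Dict.foldl_insert_getD_add_one_eq_counter N]
      rfl
    have hfm : (if (pvFM N).contains v then pvFM N else (pvFM N).insert v ((pvFM N).size : Int))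
        = pvFM (N ++ [v]) := by
      unfold pvFM; rw [List.foldl_append]; rfl
    show (_, _, _) = _
    simp only [hcnt, hfm, Prod.mk.injEq]
    refine ⟨trivial, trivial, ?_⟩
    have hstep := pv_best_step N v
    cases hb : PySem.List.max? (PySem.List.dedup N) (fun x => (N.count x : Int)) with
    | none => rw [hb] at hstep; exact hstep
    | some b =>
      rw [hb] at hstep
      simp only [] at hstep ⊢
      have hbN : b ∈ N :=
        (PySem.List.mem_dedup _ _).mp (PySem.List.max?_mem hb)
      rw [PySem.Dict.getD_counter, PySem.Dict.getD_counter,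
          (pv_FM_spec (N ++ [v])).2.2 v (by simp),
          (pv_FM_spec (N ++ [v])).2.2 b (by simp [hbN])]
      exact hstep

-- ---------- splitting the fused fold into its two streams ----------

def pvCollectB (t1 t2 : Int) : Option Int × Option Int → List Int → List Int
  | _, [] => []
  | p, v :: vs => (if p = (some t1, some t2) then [v] else []) ++ pvCollectB t1 t2 (p.2, some v) vs

def pvCollectU (t2 : Int) : Option Int → List Int → List Int
  | _, [] => []
  | p1, v :: vs => (if p1 = some t2 then [v] else []) ++ pvCollectU t2 (some v) vs

def pvPLast2 (p2 p1 : Option Int) (vs : List Int) : Option Int × Option Int :=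
  vs.foldl (fun (p : Option Int × Option Int) v => (p.2, some v)) (p2, p1)

theorem pv_fused_split (t1 t2 : Int) :
    ∀ (vs : List Int)
      (B U : PySem.Dict Int Int × PySem.Dict Int Int × Option Int) (p2 p1 : Option Int),
    vs.foldl (fun s v =>
        ((if (s.2.2.1, s.2.2.2) = (some t1, some t2) then pvBump s.1 v else s.1),
         (if s.2.2.2 = some t2 then pvBump s.2.1 v else s.2.1),
         s.2.2.2, some v)) (B, U, p2, p1)
      = ((pvCollectB t1 t2 (p2, p1) vs).foldl pvBump B,
         (pvCollectU t2 p1 vs).foldl pvBump U,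
         (pvPLast2 p2 p1 vs).1, (pvPLast2 p2 p1 vs).2) := by
  intro vs
  induction vs with
  | nil => intro B U p2 p1; rfl
  | cons v vs ih =>
    intro B U p2 p1
    simp only [List.foldl_cons, pvCollectB, pvCollectU, List.foldl_append]
    rw [ih]
    have hp : pvPLast2 p2 p1 (v :: vs) = pvPLast2 p1 (some v) vs := rfl
    rw [hp]
    congr 1
    · congr 1
      by_cases h : (p2, p1) = (some t1, some t2)
      · rw [if_pos h, if_pos (by simpa using h)]
        rfl
      · rw [if_neg h, if_neg (by simpa using h)]
        rfl
    · congr 2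
      by_cases h : p1 = some t2
      · rw [if_pos h, if_pos h]; rfl
      · rw [if_neg h, if_neg h]; rfl

theorem pv_plast2_snd (vs : List Int) : ∀ (p2 p1 : Option Int),
    (pvPLast2 p2 p1 vs).2 = match vs.getLast? with | some a => some a | none => p1 := by
  induction vs using List.reverseRecOn with
  | nil => intro p2 p1; rfl
  | append_singleton vs a ih =>
    intro p2 p1
    unfold pvPLast2
    rw [List.foldl_append]
    simp [List.getLast?_append]

theorem pv_plast2_spec (vs : List Int) (p2 p1 : Option Int) (h : 2 ≤ vs.length) :
    pvPLast2 p2 p1 vs = (vs[vs.length - 2]?, vs[vs.length - 1]?) := by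
  induction vs using List.reverseRecOn with
  | nil => simp at h
  | append_singleton vs a ih =>
    unfold pvPLast2
    rw [List.foldl_append]
    have h1 : vs ≠ [] := by
      intro he; subst he; simp at h
    show ((pvPLast2 p2 p1 vs).2, some a) = _
    rw [pv_plast2_snd]
    have h2 : vs.getLast? = some (vs.getLast h1) := List.getLast?_eq_some_getLast h1
    rw [h2]
    have h3 : (vs ++ [a]).length - 2 = vs.length - 1 := by
      simp only [List.length_append, List.length_cons, List.length_nil]
      omega
    have h4 : (vs ++ [a]).length - 1 = vs.length := by simp
    rw [h3, h4]
    rw [List.getElem?_append_left (by omega), List.getElem?_append_right (by omega)]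
    simp [List.getLast_eq_getElem, List.getElem?_eq_getElem (by omega : vs.length - 1 < vs.length)]

theorem pv_collectB_snoc (t1 t2 v : Int) : ∀ (vs : List Int) (p : Option Int × Option Int),
    pvCollectB t1 t2 p (vs ++ [v])
      = pvCollectB t1 t2 p vs
        ++ (if pvPLast2 p.1 p.2 vs = (some t1, some t2) then [v] else []) := by
  intro vs
  induction vs with
  | nil =>
    intro p
    obtain ⟨a, b⟩ := p
    simp [pvCollectB, pvPLast2]
  | cons a vs ih =>
    intro p
    show (if p = (some t1, some t2) then [a] else []) ++ pvCollectB t1 t2 (p.2, some a) (vs ++ [v])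
        = ((if p = (some t1, some t2) then [a] else []) ++ pvCollectB t1 t2 (p.2, some a) vs) ++ _
    rw [ih]
    have hp : pvPLast2 p.1 p.2 (a :: vs) = pvPLast2 p.2 (some a) vs := rfl
    rw [hp, List.append_assoc]

theorem pv_collectU_snoc (t2 v : Int) : ∀ (vs : List Int) (p1 : Option Int),
    pvCollectU t2 p1 (vs ++ [v])
      = pvCollectU t2 p1 vs
        ++ (if (pvPLast2 none p1 vs).2 = some t2 then [v] else []) := by
  intro vs
  induction vs with
  | nil =>
    intro p1
    simp [pvCollectU, pvPLast2]
  | cons a vs ih =>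
    intro p1
    show (if p1 = some t2 then [a] else []) ++ pvCollectU t2 (some a) (vs ++ [v])
        = ((if p1 = some t2 then [a] else []) ++ pvCollectU t2 (some a) vs) ++ _
    rw [ih, List.append_assoc]
    have hp : (pvPLast2 none p1 (a :: vs)).2 = (pvPLast2 none (some a) vs).2 := by
      rw [pv_plast2_snd, pv_plast2_snd]
      cases hl : vs.getLast? with
      | none =>
        have hnil : vs = [] := by simpa using hl
        subst hnil
        rfl
      | some x => simp [List.getLast?_cons, hl]
    rw [hp]

theorem pv_pyGetD_append (xs : List Int) (v : Int) (i : Int) (h0 : 0 ≤ i) (h : i < xs.length) :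
    PySem.List.pyGetD (xs ++ [v]) i 0 = PySem.List.pyGetD xs i 0 := by
  rw [PySem.List.pyGetD_eq_getElem _ _ h0 (by simp; omega),
      PySem.List.pyGetD_eq_getElem _ _ h0 (by exact_mod_cast h),
      List.getElem_append_left (by omega)]

theorem pv_collectB_spec (t1 t2 : Int) (vs : List Int) :
    pvCollectB t1 t2 (none, none) vs
      = ((PySem.List.pyRange 0 ((vs.length : Int) - 2) 1).filter
          (fun i => (PySem.List.pyGetD vs i 0, PySem.List.pyGetD vs (i + 1) 0) == (t1, t2))).map
          (fun i => PySem.List.pyGetD vs (i + 2) 0) := by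
  induction vs using List.reverseRecOn with
  | nil => rfl
  | append_singleton vs v ih =>
    rw [pv_collectB_snoc, ih]
    by_cases h2 : 2 ≤ vs.length
    · have hlen : ((vs ++ [v]).length : Int) - 2 = ((vs.length : Int) - 2) + 1 := by
        simp; omega
      rw [hlen, PySem.List.pyRange_one_succ_right (by omega), List.filter_append, List.map_append]
      congr 1
      · have hpred : ∀ i ∈ PySem.List.pyRange 0 ((vs.length : Int) - 2) 1,
            ((PySem.List.pyGetD (vs ++ [v]) i 0, PySem.List.pyGetD (vs ++ [v]) (i + 1) 0) == (t1, t2))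
              = ((PySem.List.pyGetD vs i 0, PySem.List.pyGetD vs (i + 1) 0) == (t1, t2)) := by
          intro i hi
          rw [PySem.List.mem_pyRange_one] at hi
          rw [pv_pyGetD_append vs v i (by omega) (by omega),
              pv_pyGetD_append vs v (i + 1) (by omega) (by omega)]
        rw [List.filter_congr hpred]
        have hmap : ∀ i ∈ (PySem.List.pyRange 0 ((vs.length : Int) - 2) 1).filter
            (fun i => (PySem.List.pyGetD vs i 0, PySem.List.pyGetD vs (i + 1) 0) == (t1, t2)),
            PySem.List.pyGetD (vs ++ [v]) (i + 2) 0 = PySem.List.pyGetD vs (i + 2) 0 := by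
          intro i hi
          have hm := List.mem_of_mem_filter hi
          rw [PySem.List.mem_pyRange_one] at hm
          exact pv_pyGetD_append vs v (i + 2) (by omega) (by omega)
        rw [List.map_congr_left hmap]
      · have e0 : pvPLast2 none none vs = (vs[vs.length - 2]?, vs[vs.length - 1]?) :=
          pv_plast2_spec vs none none h2
        have hg1 : vs[vs.length - 2]? = some vs[vs.length - 2] :=
          List.getElem?_eq_getElem (by omega)
        have hg2 : vs[vs.length - 1]? = some vs[vs.length - 1] :=
          List.getElem?_eq_getElem (by omega)
        have e1 : PySem.List.pyGetD (vs ++ [v]) ((vs.length : Int) - 2) 0 = vs[vs.length - 2] := by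
          rw [PySem.List.pyGetD_eq_getElem _ _ (by omega) (by simp; try omega),
              List.getElem_append_left (by omega)]
          congr 1
          omega
        have e2 : PySem.List.pyGetD (vs ++ [v]) ((vs.length : Int) - 2 + 1) 0 = vs[vs.length - 1] := by
          rw [PySem.List.pyGetD_eq_getElem _ _ (by omega) (by simp; try omega),
              List.getElem_append_left (by omega)]
          congr 1
          omega
        have e3 : PySem.List.pyGetD (vs ++ [v]) ((vs.length : Int) - 2 + 2) 0 = v := by
          rw [PySem.List.pyGetD_eq_getElem _ _ (by omega) (by simp; try omega)]
          simp
        rw [e0, hg1, hg2]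
        simp only [List.filter_cons, List.filter_nil, e1, e2]
        by_cases hc : (vs[vs.length - 2], vs[vs.length - 1]) = ((t1 : Int), (t2 : Int))
        · rw [if_pos (by simpa using hc),
              show ((vs[vs.length - 2], vs[vs.length - 1]) == ((t1 : Int), (t2 : Int))) = true by
                simpa using hc]
          simp only [if_true, List.map_cons, List.map_nil, e3]
        · rw [if_neg (by simpa using hc),
              show ((vs[vs.length - 2], vs[vs.length - 1]) == ((t1 : Int), (t2 : Int))) = false by
                simpa using hc]
          simp
    · have hrange : PySem.List.pyRange 0 (((vs ++ [v]).length : Int) - 2) 1 = [] := by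
        apply List.eq_nil_iff_forall_not_mem.mpr
        intro i hi
        rw [PySem.List.mem_pyRange_one] at hi
        simp at hi
        omega
      have hrange0 : PySem.List.pyRange 0 ((vs.length : Int) - 2) 1 = [] := by
        apply List.eq_nil_iff_forall_not_mem.mpr
        intro i hi
        rw [PySem.List.mem_pyRange_one] at hi
        omega
      rw [hrange0, hrange]
      simp only [List.filter_nil, List.map_nil, List.nil_append]
      rcases vs with _ | ⟨a, _ | ⟨b, tl⟩⟩
      · simp [pvPLast2]
      · simp [pvPLast2]
      · simp at h2

theorem pv_collectU_spec (t2 : Int) (vs : List Int) :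
    pvCollectU t2 none vs
      = ((PySem.List.pyRange 0 ((vs.length : Int) - 1) 1).filter
          (fun i => PySem.List.pyGetD vs i 0 == t2)).map
          (fun i => PySem.List.pyGetD vs (i + 1) 0) := by
  induction vs using List.reverseRecOn with
  | nil => rfl
  | append_singleton vs v ih =>
    rw [pv_collectU_snoc, ih]
    by_cases h1 : 1 ≤ vs.length
    · have hlen : ((vs ++ [v]).length : Int) - 1 = ((vs.length : Int) - 1) + 1 := by
        simp
      rw [hlen, PySem.List.pyRange_one_succ_right (by omega), List.filter_append, List.map_append]
      congr 1
      · have hpred : ∀ i ∈ PySem.List.pyRange 0 ((vs.length : Int) - 1) 1,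
            (PySem.List.pyGetD (vs ++ [v]) i 0 == t2) = (PySem.List.pyGetD vs i 0 == t2) := by
          intro i hi
          rw [PySem.List.mem_pyRange_one] at hi
          rw [pv_pyGetD_append vs v i (by omega) (by omega)]
        rw [List.filter_congr hpred]
        have hmap : ∀ i ∈ (PySem.List.pyRange 0 ((vs.length : Int) - 1) 1).filter
            (fun i => PySem.List.pyGetD vs i 0 == t2),
            PySem.List.pyGetD (vs ++ [v]) (i + 1) 0 = PySem.List.pyGetD vs (i + 1) 0 := by
          intro i hi
          have hm := List.mem_of_mem_filter hi
          rw [PySem.List.mem_pyRange_one] at hm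
          exact pv_pyGetD_append vs v (i + 1) (by omega) (by omega)
        rw [List.map_congr_left hmap]
      · have hvne : vs ≠ [] := by intro he; subst he; simp at h1
        have e0 : (pvPLast2 none none vs).2 = some (vs.getLast hvne) := by
          rw [pv_plast2_snd, List.getLast?_eq_some_getLast hvne]
        have e1 : PySem.List.pyGetD (vs ++ [v]) ((vs.length : Int) - 1) 0 = vs.getLast hvne := by
          rw [PySem.List.pyGetD_eq_getElem _ _ (by omega) (by simp; try omega),
              List.getElem_append_left (by omega), List.getLast_eq_getElem]
          congr 1
          omega
        have e2 : PySem.List.pyGetD (vs ++ [v]) ((vs.length : Int) - 1 + 1) 0 = v := by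
          rw [PySem.List.pyGetD_eq_getElem _ _ (by omega) (by simp; try omega)]
          simp
        rw [e0]
        simp only [List.filter_cons, List.filter_nil, e1]
        by_cases hc : vs.getLast hvne = t2
        · rw [if_pos (by simpa using hc),
              show (vs.getLast hvne == t2) = true by simpa using hc]
          simp only [if_true, List.map_cons, List.map_nil, e2]
        · rw [if_neg (by simpa using hc),
              show (vs.getLast hvne == t2) = false by simpa using hc]
          simp
    · have hnil : vs = [] := by
        cases vs with
        | nil => rfl
        | cons a tl => exfalso; simp at h1
      subst hnil
      simp [pvPLast2]

-- ---------- assembling both reductions ----------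

theorem pvAt_eq (h : List (List Int)) (pos : Int) (i : Int) (h0 : 0 ≤ i) (hn : i < h.length) :
    pvAt h i pos = PySem.List.pyGetD (h.map (fun row => PySem.List.pyGetD row pos 0)) i 0 := by
  unfold pvAt
  rw [PySem.List.pyGetD_eq_getElem _ _ h0 (by exact_mod_cast hn),
      PySem.List.pyGetD_eq_getElem _ _ h0 (by simpa using hn),
      List.getElem_map]

theorem pv_main (h : List (List Int)) (pos : Int) :
    method_bigram h pos = method_bigram_alt h pos := by
  unfold method_bigram method_bigram_alt
  by_cases hl : (h.length : Int) < 3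
  · rw [if_pos hl, if_pos hl]
  · rw [if_neg hl, if_neg hl]
    simp only []
    have hlen3 : 3 ≤ h.length := by omega
    -- abbreviations
    set t1 := pvAt h (-2) pos with ht1
    set t2 := pvAt h (-1) pos with ht2
    set vs := h.map (fun row => PySem.List.pyGetD row pos 0) with hvs
    have hvslen : vs.length = h.length := by simp [hvs]
    -- A side: reduce both tables
    refine Eq.trans (pv_core (fun i => (pvAt h i pos, pvAt h (i + 1) pos))
        (fun i => pvAt h (i + 2) pos)
        (t1, t2) (PySem.List.pyRange 0 ((h.length : Int) - 2) 1) (method_transition h pos)) ?_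
    have htrans : method_transition h pos =
        (if (((PySem.List.pyRange 0 ((h.length : Int) - 1) 1).filter
            (fun i => pvAt h i pos == t2)).map (fun i => pvAt h (i + 1) pos)) ≠ [] then
           (PySem.List.max? (PySem.List.dedup (((PySem.List.pyRange 0 ((h.length : Int) - 1) 1).filter
              (fun i => pvAt h i pos == t2)).map (fun i => pvAt h (i + 1) pos)))
             (fun x => ((((PySem.List.pyRange 0 ((h.length : Int) - 1) 1).filter
              (fun i => pvAt h i pos == t2)).map (fun i => pvAt h (i + 1) pos)).count x : Int))).getD 0
         else t2) := by
      unfold method_transition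
      exact pv_core (fun i => pvAt h i pos) (fun i => pvAt h (i + 1) pos) t2
        (PySem.List.pyRange 0 ((h.length : Int) - 1) 1) t2
    rw [htrans]
    -- B side: split the fused fold
    have hfold : h.foldl (fun s row =>
        ((if (s.2.2.1, s.2.2.2) = (some t1, some t2) then pvBump s.1 (PySem.List.pyGetD row pos 0) else s.1),
         (if s.2.2.2 = some t2 then pvBump s.2.1 (PySem.List.pyGetD row pos 0) else s.2.1),
         s.2.2.2, some (PySem.List.pyGetD row pos 0)))
        ((PySem.Dict.empty, PySem.Dict.empty, none),
         (PySem.Dict.empty, PySem.Dict.empty, none), none, none)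
      = vs.foldl (fun s v =>
        ((if (s.2.2.1, s.2.2.2) = (some t1, some t2) then pvBump s.1 v else s.1),
         (if s.2.2.2 = some t2 then pvBump s.2.1 v else s.2.1),
         s.2.2.2, some v))
        ((PySem.Dict.empty, PySem.Dict.empty, none),
         (PySem.Dict.empty, PySem.Dict.empty, none), none, none) :=
      (List.foldl_map (f := fun row => PySem.List.pyGetD row pos 0)
        (g := fun s v =>
        ((if (s.2.2.1, s.2.2.2) = (some t1, some t2) then pvBump s.1 v else s.1),
         (if s.2.2.2 = some t2 then pvBump s.2.1 v else s.2.1),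
         s.2.2.2, some v))
        (l := h)
        (init := ((PySem.Dict.empty, PySem.Dict.empty, none),
         (PySem.Dict.empty, PySem.Dict.empty, none), none, none))).symm
    rw [hfold, pv_fused_split t1 t2 vs _ _ none none,
        pv_collectB_spec t1 t2 vs, pv_collectU_spec t2 vs]
    -- identify the successor lists
    have hNb : ((PySem.List.pyRange 0 ((vs.length : Int) - 2) 1).filter
          (fun i => (PySem.List.pyGetD vs i 0, PySem.List.pyGetD vs (i + 1) 0) == (t1, t2))).map
          (fun i => PySem.List.pyGetD vs (i + 2) 0)
        = ((PySem.List.pyRange 0 ((h.length : Int) - 2) 1).filter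
          (fun i => (pvAt h i pos, pvAt h (i + 1) pos) == (t1, t2))).map
          (fun i => pvAt h (i + 2) pos) := by
      rw [hvslen]
      have hpred : ∀ i ∈ PySem.List.pyRange 0 ((h.length : Int) - 2) 1,
          ((PySem.List.pyGetD vs i 0, PySem.List.pyGetD vs (i + 1) 0) == (t1, t2))
            = ((pvAt h i pos, pvAt h (i + 1) pos) == (t1, t2)) := by
        intro i hi
        rw [PySem.List.mem_pyRange_one] at hi
        rw [← pvAt_eq h pos i (by omega) (by omega),
            ← pvAt_eq h pos (i + 1) (by omega) (by omega)]
      rw [List.filter_congr hpred]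
      apply List.map_congr_left
      intro i hi
      have hm := List.mem_of_mem_filter hi
      rw [PySem.List.mem_pyRange_one] at hm
      exact (pvAt_eq h pos (i + 2) (by omega) (by omega)).symm
    have hNu : ((PySem.List.pyRange 0 ((vs.length : Int) - 1) 1).filter
          (fun i => PySem.List.pyGetD vs i 0 == t2)).map
          (fun i => PySem.List.pyGetD vs (i + 1) 0)
        = ((PySem.List.pyRange 0 ((h.length : Int) - 1) 1).filter
          (fun i => pvAt h i pos == t2)).map (fun i => pvAt h (i + 1) pos) := by
      rw [hvslen]
      have hpred : ∀ i ∈ PySem.List.pyRange 0 ((h.length : Int) - 1) 1,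
          (PySem.List.pyGetD vs i 0 == t2) = (pvAt h i pos == t2) := by
        intro i hi
        rw [PySem.List.mem_pyRange_one] at hi
        rw [← pvAt_eq h pos i (by omega) (by omega)]
      rw [List.filter_congr hpred]
      apply List.map_congr_left
      intro i hi
      have hm := List.mem_of_mem_filter hi
      rw [PySem.List.mem_pyRange_one] at hm
      exact (pvAt_eq h pos (i + 1) (by omega) (by omega)).symm
    rw [hNb, hNu, pv_stream_inv, pv_stream_inv]
    simp only []
    -- now case on the two maxima
    set Nb := ((PySem.List.pyRange 0 ((h.length : Int) - 2) 1).filter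
          (fun i => (pvAt h i pos, pvAt h (i + 1) pos) == (t1, t2))).map
          (fun i => pvAt h (i + 2) pos) with hNbdef
    set Nu := ((PySem.List.pyRange 0 ((h.length : Int) - 1) 1).filter
          (fun i => pvAt h i pos == t2)).map (fun i => pvAt h (i + 1) pos) with hNudef
    cases hmb : PySem.List.max? (PySem.List.dedup Nb) (fun x => (Nb.count x : Int)) with
    | some m =>
      have hne : Nb ≠ [] := by
        intro he
        rw [he] at hmb
        simp [PySem.List.max?] at hmb
      rw [if_pos hne]
      rfl
    | none =>
      have hnil : Nb = [] := (pv_dedup_nil_iff Nb).mp ((PySem.List.max?_eq_none_iff _ _).mp hmb)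
      rw [if_neg (by simpa using hnil)]
      cases hmu : PySem.List.max? (PySem.List.dedup Nu) (fun x => (Nu.count x : Int)) with
      | some m =>
        have hne : Nu ≠ [] := by
          intro he
          rw [he] at hmu
          simp [PySem.List.max?] at hmu
        rw [if_pos hne]
        rfl
      | none =>
        have hnil : Nu = [] := (pv_dedup_nil_iff Nu).mp ((PySem.List.max?_eq_none_iff _ _).mp hmu)
        rw [if_neg (by simpa using hnil)]

-- ===== VERDICT (by name: the statement is the Claim_ definition above) =====
theorem method_bigram_spec : Claim_equal_method_bigram := by
  unfold Claim_equal_method_bigram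
  intro history pos _ _
  unfold Spec_method_bigram
  exact pv_main history pos
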